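-- pv_equiv track=rewrite | github.com/MilesGregg/turing-machine-tester | makeTests.py | p5
-- ===== SOURCE A (Python) =====
-- def p5(input):
--     l = 0
--     r = len(input)-1
--     while l <= r:
--         if input[l] == input[r]:
--             return False
--         l += 1
--         r -= 1
--     return True
-- ===== SOURCE B (Python) =====
-- def p5(input):
--     if len(input) == 0:
--         return True
--     if input[0] == input[-1]:
--         return False
--     return p5(input[1:-1])
-- ===== Notes on version B (the rewrite author's own statement) =====
-- stated objective: alternative
-- what changed: B replaces A's iterative two-pointer index loop by structural recursion that peels one character off each end via slicing; the single head-vs-last check also covers the odd-middle case.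
import Mathlib
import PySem

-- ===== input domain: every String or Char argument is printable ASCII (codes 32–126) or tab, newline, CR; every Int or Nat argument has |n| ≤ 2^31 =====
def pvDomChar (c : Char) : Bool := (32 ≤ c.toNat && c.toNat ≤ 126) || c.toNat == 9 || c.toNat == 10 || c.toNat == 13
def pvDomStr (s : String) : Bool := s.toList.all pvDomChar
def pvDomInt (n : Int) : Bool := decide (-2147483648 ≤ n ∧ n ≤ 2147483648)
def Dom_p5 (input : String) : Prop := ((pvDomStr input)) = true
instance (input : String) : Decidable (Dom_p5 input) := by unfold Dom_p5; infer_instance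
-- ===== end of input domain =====

-- B replaces A's iterative two-pointer loop by recursion peeling one character off each end (alternative decomposition, not faster).


-- ===== PORT A =====
-- the while loop of A, state (l, r)
def p5Go (cs : List Char) (l r : Int) : Bool :=
  if _h : l ≤ r then
    if PySem.List.pyGet? cs l = PySem.List.pyGet? cs r then false
    else p5Go cs (l + 1) (r - 1)
  else true
termination_by (r + 1 - l).toNat
decreasing_by omega

def p5 (input : String) : Bool :=
  p5Go input.toList 0 (PySem.List.len input.toList - 1)

-- ===== PORT B =====
def p5AltGo (cs : List Char) : Bool :=
  if _h : cs = [] then true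
  else if PySem.List.pyGet? cs 0 = PySem.List.pyGet? cs (-1) then false
  else p5AltGo (PySem.List.slice cs (some 1) (some (-1)))
termination_by cs.length
decreasing_by
  simp only [PySem.List.length_slice, PySem.List.clampIdx_neg_one]
  have : cs.length ≠ 0 := by simpa [List.length_eq_zero_iff] using _h
  omega

def p5_alt (input : String) : Bool := p5AltGo input.toList

-- ===== PRECONDITION & SPEC =====
def Spec_p5 (input : String) (out : Bool) : Prop := out = p5_alt input
instance (input : String) (out : Bool) : Decidable (Spec_p5 input out) := by unfold Spec_p5; infer_instance

-- ===== CLAIM (what is proved, stated in full; the proofs are below) =====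
def Claim_equal_p5 : Prop := ∀ (input : String), Dom_p5 input → Spec_p5 input (p5 input)

-- ===== LEMMAS AND PROOFS =====

-- indexing the middle of c :: (ms ++ [d])
theorem pyGet?_mid (c d : Char) (ms : List Char) (i : Int)
    (h0 : 0 ≤ i) (h1 : i < (ms.length : Int)) :
    PySem.List.pyGet? (c :: (ms ++ [d])) (i + 1) = PySem.List.pyGet? ms i := by
  rw [PySem.List.pyGet?_of_nonneg _ (by omega), PySem.List.pyGet?_of_nonneg _ h0]
  have : (i + 1).toNat = i.toNat + 1 := by omega
  rw [this, List.getElem?_cons_succ, List.getElem?_append_left (by omega)]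

-- A's loop on c :: (ms ++ [d]), shifted one step in from both ends, is A's loop on ms.
theorem p5Go_shift (c d : Char) (ms : List Char) :
    ∀ (k : Nat) (l r : Int), (r + 1 - l).toNat ≤ k → 0 ≤ l → r < (ms.length : Int) →
    p5Go (c :: (ms ++ [d])) (l + 1) (r + 1) = p5Go ms l r := by
  intro k
  induction k with
  | zero =>
    intro l r hk hl hr
    conv_lhs => rw [p5Go]
    conv_rhs => rw [p5Go]
    rw [dif_neg (show ¬(l + 1 ≤ r + 1) by omega), dif_neg (show ¬(l ≤ r) by omega)]
  | succ k ih =>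
    intro l r hk hl hr
    conv_lhs => rw [p5Go]
    conv_rhs => rw [p5Go]
    by_cases h : l ≤ r
    · rw [dif_pos (show l + 1 ≤ r + 1 by omega), dif_pos h]
      rw [pyGet?_mid c d ms l hl (by omega), pyGet?_mid c d ms r (by omega) hr]
      by_cases he : PySem.List.pyGet? ms l = PySem.List.pyGet? ms r
      · simp [he]
      · rw [if_neg he, if_neg he,
          show l + 1 + 1 = (l + 1) + 1 by ring, show r + 1 - 1 = (r - 1) + 1 by ring]
        exact ih (l + 1) (r - 1) (by omega) (by omega) (by omega)
    · rw [dif_neg (show ¬(l + 1 ≤ r + 1) by omega), dif_neg h]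

-- last element as a nonnegative index
theorem pyGet?_len_sub_one (cs : List Char) (h : cs ≠ []) :
    PySem.List.pyGet? cs ((cs.length : Int) - 1) = PySem.List.pyGet? cs (-1) := by
  have hpos : 0 < cs.length := List.length_pos_iff.mpr h
  rw [PySem.List.pyGet?_neg_one, PySem.List.pyGet?_of_nonneg _ (by omega),
    List.getLast?_eq_getElem?]
  congr 1
  omega

-- slicing off both ends
theorem slice_mid (c d : Char) (ms : List Char) :
    PySem.List.slice (c :: (ms ++ [d])) (some 1) (some (-1)) = ms := by
  simp [PySem.List.slice, PySem.List.clampIdx]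
  rw [if_neg (by omega)]
  simp

theorem p5Go_eq_altGo : ∀ (n : Nat) (cs : List Char), cs.length = n →
    p5Go cs 0 ((cs.length : Int) - 1) = p5AltGo cs := by
  intro n
  induction n using Nat.strong_induction_on with
  | _ n ih =>
    intro cs hlen
    rw [p5AltGo]
    by_cases hnil : cs = []
    · subst hnil
      rw [dif_pos rfl, p5Go, dif_neg (by simp)]
    · rw [dif_neg hnil]
      have hpos : 0 < cs.length := List.length_pos_iff.mpr hnil
      rw [p5Go, dif_pos (by omega), pyGet?_len_sub_one cs hnil]
      by_cases he : PySem.List.pyGet? cs 0 = PySem.List.pyGet? cs (-1)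
      · simp [he]
      · rw [if_neg he, if_neg he]
        -- he forces length ≥ 2: a singleton has first = last
        have h2 : 2 ≤ cs.length := by
          rcases cs with _ | ⟨a, rest⟩
          · exact absurd rfl hnil
          · rcases rest with _ | ⟨b, rest'⟩
            · exact absurd (by
                simp [PySem.List.pyGet?_neg_one]) he
            · simp
        obtain ⟨a, rest, rfl⟩ : ∃ a rest, cs = a :: rest := by
          rcases cs with _ | ⟨a, rest⟩
          · exact absurd rfl hnil
          · exact ⟨a, rest, rfl⟩
        have hrne : rest ≠ [] := by
          intro h; rw [h] at h2; simp at h2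
        obtain ⟨ms, d, rfl⟩ : ∃ ms d, rest = ms ++ [d] :=
          ⟨rest.dropLast, rest.getLast hrne, (List.dropLast_append_getLast hrne).symm⟩
        rw [slice_mid a d ms]
        have hlen2 : ((a :: (ms ++ [d])).length : Int) - 1 - 1 = ((ms.length : Int) - 1) + 1 := by
          simp
        rw [hlen2,
          p5Go_shift a d ms ((ms.length : Int) - 1 + 1 - 0).toNat 0 ((ms.length : Int) - 1)
            le_rfl le_rfl (by omega)]
        exact ih ms.length (by simp at hlen; omega) ms rfl

-- ===== VERDICT (by name: the statement is the Claim_ definition above) =====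
theorem p5_spec : Claim_equal_p5 := by
  intro input _
  unfold Spec_p5 p5 p5_alt
  rw [PySem.List.len_eq]
  exact p5Go_eq_altGo input.toList.length input.toList rfl
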